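-- pv_equiv track=rewrite | github.com/JohnSunny21/python-daily-coding | FreeCodeCamp/CodingQ/LettersNumbers.py | separate_letters_and_numbers_gen
-- ===== SOURCE A (Python) =====
-- def separate_letters_and_numbers_gen(s: str):
--
--     prev = s[0]
--
--     yield prev
--
--     for curr in s[1:]:
--
--         if(prev.isalpha() and curr.isdigit()) or (prev.isdigit() and curr.isalpha()):
--             yield '-'
--         yield curr
--         prev = curr
-- ===== SOURCE B (Python) =====
-- def separate_letters_and_numbers_gen(s: str):
--     def key(c):
--         return 'a' if c.isalpha() else 'd' if c.isdigit() else 'o'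
--
--     def runs(cs):
--         # run-length grouping: maximal blocks of same class
--         out = []
--         i = 0
--         while i < len(cs):
--             k = key(cs[i])
--             j = i + 1
--             while j < len(cs) and key(cs[j]) == k:
--                 j += 1
--             out.append((k, cs[i:j]))
--             i = j
--         return out
--
--     prev_k = None
--     for k, run in runs(s):
--         if (prev_k, k) in (('a', 'd'), ('d', 'a')):
--             yield '-'
--         yield from run
--         prev_k = k
-- ===== Notes on version B (the rewrite author's own statement) =====
-- stated objective: alternative
-- what changed: B first run-length-groups the string into maximal same-class runs ('a'/'d'/'o') and then emits run by run, inserting '-' only between an alpha run and a digit run, instead of A's single stateful scan over adjacent character pairs.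
import Mathlib
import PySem

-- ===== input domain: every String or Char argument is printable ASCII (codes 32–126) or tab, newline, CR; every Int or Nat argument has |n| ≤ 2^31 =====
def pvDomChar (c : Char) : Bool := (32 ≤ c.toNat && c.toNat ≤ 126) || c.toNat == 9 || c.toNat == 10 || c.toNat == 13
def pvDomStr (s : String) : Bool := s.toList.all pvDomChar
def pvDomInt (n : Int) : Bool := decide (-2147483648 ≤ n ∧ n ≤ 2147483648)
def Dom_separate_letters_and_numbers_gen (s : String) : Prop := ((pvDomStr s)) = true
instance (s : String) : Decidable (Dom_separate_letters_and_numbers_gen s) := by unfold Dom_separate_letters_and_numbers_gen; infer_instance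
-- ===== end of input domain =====

-- B replaces A's stateful adjacent-pair scan by a two-phase run-length algorithm (group the
-- string into maximal same-class runs, then emit '-' between alpha/digit runs); same cost;
-- the generators' yielded sequences are compared as lists.

-- ===== PORT A =====
-- A: save first char as prev and yield it; then for each later char, yield '-' when prev and
--    curr are an alpha/digit pair (either order), yield curr, update prev
def separate_letters_and_numbers_gen (s : String) : List String :=
  match s.toList with
  | [] => []   -- unreachable: Pre_ excludes "" (indexing the first character raises IndexError)
  | p :: rest =>
    (rest.foldl (fun (st : Char × List String) curr =>
        (curr,
          (if (PySem.Chars.isalpha st.1 && PySem.Chars.isdigit curr)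
              || (PySem.Chars.isdigit st.1 && PySem.Chars.isalpha curr)
           then st.2 ++ ["-"] else st.2) ++ [String.mk [curr]]))
      (p, [String.mk [p]])).2

-- ===== PORT B =====
-- B's key function: 'a' for letters, 'd' for digits, 'o' otherwise
def pvKey (c : Char) : Char :=
  if PySem.Chars.isalpha c then 'a' else if PySem.Chars.isdigit c then 'd' else 'o'

-- B's runs(): run-length grouping into maximal blocks of equal class (each outer while-loop
-- iteration of Source B = one step here; the inner scan for the block end = takeWhile/dropWhile)
def pvRunsList : List Char → List (Char × List Char)
  | [] => []
  | c :: t =>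
    (pvKey c, c :: t.takeWhile (fun x => pvKey x == pvKey c)) ::
      pvRunsList (t.dropWhile (fun x => pvKey x == pvKey c))
termination_by l => l.length
decreasing_by
  exact Nat.lt_succ_of_le (List.length_dropWhile_le _ _)

-- B's second phase: emit the runs, a '-' between an alpha run and a digit run (prev_k = None at start)
def pvEmit : Option Char → List (Char × List Char) → List String
  | _, [] => []
  | pk, (k, run) :: rest =>
    (if (pk = some 'a' ∧ k = 'd') ∨ (pk = some 'd' ∧ k = 'a') then ["-"] else [])
      ++ run.map (fun c => String.mk [c]) ++ pvEmit (some k) rest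

def separate_letters_and_numbers_gen_alt (s : String) : List String :=
  pvEmit none (pvRunsList s.toList)

-- ===== PRECONDITION & SPEC =====
-- Pre_ excludes only the empty string, on which A's first-character indexing raises IndexError.
def Pre_separate_letters_and_numbers_gen (s : String) : Prop := s ≠ ""
instance (s : String) : Decidable (Pre_separate_letters_and_numbers_gen s) := by
  unfold Pre_separate_letters_and_numbers_gen; infer_instance
def pvWitness_separate_letters_and_numbers_gen : String := "ab12c 3"

def Spec_separate_letters_and_numbers_gen (s : String) (out : List String) : Prop := out = separate_letters_and_numbers_gen_alt s
instance (s : String) (out : List String) : Decidable (Spec_separate_letters_and_numbers_gen s out) := by unfold Spec_separate_letters_and_numbers_gen; infer_instance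

-- ===== CLAIM (what is proved, stated in full; the proofs are below) =====
def Claim_equal_separate_letters_and_numbers_gen : Prop := ∀ (s : String), Dom_separate_letters_and_numbers_gen s → Pre_separate_letters_and_numbers_gen s → Spec_separate_letters_and_numbers_gen s (separate_letters_and_numbers_gen s)

-- ===== LEMMAS AND PROOFS =====

-- common recursive characterisation: the tail of the output after yielding the first character
def pvSpecRec : Char → List Char → List String
  | _, [] => []
  | p, c :: t =>
    (if (PySem.Chars.isalpha p && PySem.Chars.isdigit c)
        || (PySem.Chars.isdigit p && PySem.Chars.isalpha c)
     then ["-"] else []) ++ [String.mk [c]] ++ pvSpecRec c t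

-- letters and digits are disjoint
theorem pv_disj (x : Char) :
    PySem.Chars.isalpha x = true → PySem.Chars.isdigit x = true → False := by
  intro hx hy
  simp [PySem.Chars.isalpha, PySem.Chars.isupper, PySem.Chars.islower, Char.le_def,
    UInt32.le_iff_toNat_le] at hx
  simp [PySem.Chars.isdigit, Char.le_def, UInt32.le_iff_toNat_le] at hy
  omega

-- the class key determines both predicates
theorem pv_key_alpha (x : Char) : pvKey x = 'a' ↔ PySem.Chars.isalpha x = true := by
  by_cases hx : PySem.Chars.isalpha x = true <;>
  by_cases hy : PySem.Chars.isdigit x = true <;> simp [pvKey, hx, hy]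

theorem pv_key_digit (x : Char) : pvKey x = 'd' ↔ PySem.Chars.isdigit x = true := by
  by_cases hx : PySem.Chars.isalpha x = true <;>
  by_cases hy : PySem.Chars.isdigit x = true <;>
    first
    | exact absurd (pv_disj x hx hy) not_false
    | simp [pvKey, hx, hy]

-- A's boundary test equals B's run-class comparison
theorem pv_dash_eq (p c : Char) :
    ((some (pvKey p) = some 'a' ∧ pvKey c = 'd') ∨ (some (pvKey p) = some 'd' ∧ pvKey c = 'a'))
    ↔ ((PySem.Chars.isalpha p && PySem.Chars.isdigit c)
        || (PySem.Chars.isdigit p && PySem.Chars.isalpha c)) = true := by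
  simp only [Option.some.injEq, pv_key_alpha, pv_key_digit, Bool.or_eq_true, Bool.and_eq_true]

-- equal class keys force equal predicates (letters and digits being disjoint)
theorem pv_key_pred (x c : Char) (hk : pvKey x = pvKey c) :
    PySem.Chars.isalpha x = PySem.Chars.isalpha c ∧
    PySem.Chars.isdigit x = PySem.Chars.isdigit c := by
  by_cases a1 : PySem.Chars.isalpha x = true <;>
  by_cases a2 : PySem.Chars.isalpha c = true <;>
  by_cases d1 : PySem.Chars.isdigit x = true <;>
  by_cases d2 : PySem.Chars.isdigit c = true <;>
    first
    | exact absurd (pv_disj x a1 d1) not_false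
    | exact absurd (pv_disj c a2 d2) not_false
    | simp_all [pvKey]

-- pvSpecRec only depends on the previous character through its class predicates
theorem pv_spec_congr (t : List Char) (p q : Char)
    (ha : PySem.Chars.isalpha p = PySem.Chars.isalpha q)
    (hd : PySem.Chars.isdigit p = PySem.Chars.isdigit q) :
    pvSpecRec p t = pvSpecRec q t := by
  cases t with
  | nil => rfl
  | cons c t => simp [pvSpecRec, ha, hd]

-- inside a run (same class as p) no dash is emitted and the prev character's class is unchanged
theorem pv_run_skip (r : List Char) : ∀ (c : Char) (rest : List Char),
    (∀ x ∈ r, pvKey x = pvKey c) →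
    pvSpecRec c (r ++ rest) = r.map (fun x => String.mk [x]) ++ pvSpecRec c rest := by
  induction r with
  | nil => intro c rest _; rfl
  | cons x r ih =>
    intro c rest h
    have hk : pvKey x = pvKey c := h x (by simp)
    have ha : PySem.Chars.isalpha x = PySem.Chars.isalpha c := (pv_key_pred x c hk).1
    have hd : PySem.Chars.isdigit x = PySem.Chars.isdigit c := (pv_key_pred x c hk).2
    have hdash : ((PySem.Chars.isalpha c && PySem.Chars.isdigit x)
        || (PySem.Chars.isdigit c && PySem.Chars.isalpha x)) = false := by
      by_cases a2 : PySem.Chars.isalpha c = true <;>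
      by_cases d2 : PySem.Chars.isdigit c = true <;>
        first
        | exact absurd (pv_disj c a2 d2) not_false
        | simp [ha, hd, a2, d2]
    have := ih c rest (fun y hy => h y (by simp [hy]))
    calc pvSpecRec c ((x :: r) ++ rest)
        = [String.mk [x]] ++ pvSpecRec x (r ++ rest) := by
          simp [pvSpecRec, hdash]
      _ = [String.mk [x]] ++ pvSpecRec c (r ++ rest) := by
          rw [pv_spec_congr (r ++ rest) x c ha hd]
      _ = (x :: r).map (fun y => String.mk [y]) ++ pvSpecRec c rest := by
          rw [this]; simp

-- B's emit over the runs of cs, with previous class pvKey p, is the common characterisation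
theorem pv_emit_eq (cs : List Char) : ∀ (p : Char),
    pvEmit (some (pvKey p)) (pvRunsList cs) = pvSpecRec p cs := by
  induction cs using pvRunsList.induct with
  | case1 => intro p; simp [pvRunsList, pvEmit, pvSpecRec]
  | case2 c t ih =>
    intro p
    simp only [pvRunsList]
    have hmem : ∀ x ∈ t.takeWhile (fun x => pvKey x == pvKey c), pvKey x = pvKey c := by
      intro x hx
      simpa using List.mem_takeWhile_imp hx
    have hsplit : t = t.takeWhile (fun x => pvKey x == pvKey c)
        ++ t.dropWhile (fun x => pvKey x == pvKey c) := (List.takeWhile_append_dropWhile).symm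
    have hrec := ih c
    by_cases hb : ((PySem.Chars.isalpha p && PySem.Chars.isdigit c)
        || (PySem.Chars.isdigit p && PySem.Chars.isalpha c)) = true
    · have hcond : (some (pvKey p) = some 'a' ∧ pvKey c = 'd')
          ∨ (some (pvKey p) = some 'd' ∧ pvKey c = 'a') := (pv_dash_eq p c).mpr hb
      simp only [pvEmit, pvSpecRec, hb, if_pos hcond]
      rw [hrec]
      conv_rhs => rw [hsplit]
      rw [pv_run_skip _ c _ hmem]
      simp
    · have hcond : ¬ ((some (pvKey p) = some 'a' ∧ pvKey c = 'd')
          ∨ (some (pvKey p) = some 'd' ∧ pvKey c = 'a')) :=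
        fun h => hb ((pv_dash_eq p c).mp h)
      simp only [pvEmit, pvSpecRec, if_neg hcond]
      rw [hrec]
      conv_rhs => rw [hsplit]
      rw [pv_run_skip _ c _ hmem]
      simp [hb]

-- A's fold from (p, acc) appends exactly the common characterisation
theorem pv_fold_eq (t : List Char) : ∀ (p : Char) (acc : List String),
    (t.foldl (fun (st : Char × List String) curr =>
        (curr,
          (if (PySem.Chars.isalpha st.1 && PySem.Chars.isdigit curr)
              || (PySem.Chars.isdigit st.1 && PySem.Chars.isalpha curr)
           then st.2 ++ ["-"] else st.2) ++ [String.mk [curr]])) (p, acc)).2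
    = acc ++ pvSpecRec p t := by
  induction t with
  | nil => intro p acc; simp [pvSpecRec]
  | cons c t ih =>
    intro p acc
    simp only [List.foldl_cons, ih, pvSpecRec]
    by_cases h : ((PySem.Chars.isalpha p && PySem.Chars.isdigit c)
        || (PySem.Chars.isdigit p && PySem.Chars.isalpha c)) = true <;> simp [h]

-- ===== VERDICT (by name: the statement is the Claim_ definition above) =====
theorem separate_letters_and_numbers_gen_spec : Claim_equal_separate_letters_and_numbers_gen := by
  intro s _ _
  unfold Spec_separate_letters_and_numbers_gen
  unfold separate_letters_and_numbers_gen separate_letters_and_numbers_gen_alt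
  cases hs : s.toList with
  | nil => simp [pvRunsList, pvEmit]
  | cons c t =>
    dsimp only
    rw [pv_fold_eq]
    simp only [pvRunsList]
    have hmem : ∀ x ∈ t.takeWhile (fun x => pvKey x == pvKey c), pvKey x = pvKey c := by
      intro x hx
      simpa using List.mem_takeWhile_imp hx
    have hsplit : t = t.takeWhile (fun x => pvKey x == pvKey c)
        ++ t.dropWhile (fun x => pvKey x == pvKey c) := (List.takeWhile_append_dropWhile).symm
    have hnone : ¬ (((none : Option Char) = some 'a' ∧ pvKey c = 'd')
        ∨ ((none : Option Char) = some 'd' ∧ pvKey c = 'a')) := by simp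
    simp only [pvEmit, if_neg hnone]
    rw [pv_emit_eq]
    conv_lhs => rw [hsplit]
    rw [pv_run_skip _ c _ hmem]
    simp
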